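-- pv_equiv track=rewrite | github.com/posl/comment_recommendation | script/mod_gen/2_time/zh/216_D/8.py | solve
-- ===== SOURCE A (Python) =====
-- def solve(n):
--     ans = ''
--     while n > 0:
--         if n % 2 == 0:
--             n //= 2
--             ans += 'B'
--         else:
--             n -= 1
--             ans += 'A'
--     return ans[::-1]
-- ===== SOURCE B (Python) =====
-- def solve(n):
--     if n <= 0:
--         return ''
--     bits = bin(n)[2:]
--     ans = 'A'
--     for b in bits[1:]:
--         ans += 'B'
--         if b == '1':
--             ans += 'A'
--     return ans
-- ===== Notes on version B (the rewrite author's own statement) =====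
-- stated objective: alternative
-- what changed: B computes the binary digits up front with bin(n) and builds the string forward (double-and-add: 'B' per bit, extra 'A' per 1-bit), instead of A's peel-down loop on n followed by a reversal.
import Mathlib
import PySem

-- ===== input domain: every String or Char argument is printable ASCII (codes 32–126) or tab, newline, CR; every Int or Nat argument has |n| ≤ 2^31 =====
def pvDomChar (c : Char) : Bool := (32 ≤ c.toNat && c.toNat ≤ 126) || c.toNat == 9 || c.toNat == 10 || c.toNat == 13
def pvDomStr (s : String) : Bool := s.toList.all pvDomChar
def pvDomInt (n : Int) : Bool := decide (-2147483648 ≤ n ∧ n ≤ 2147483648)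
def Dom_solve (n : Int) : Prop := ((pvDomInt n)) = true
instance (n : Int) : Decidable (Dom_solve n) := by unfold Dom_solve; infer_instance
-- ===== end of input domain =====

-- B rebuilds the string forward from bin(n)'s digits (double-and-add) instead of A's peel-down loop plus reversal.

-- ===== PORT A =====
-- the while-loop of A: state (n, ans); 'ans += c' is list append
def solveLoop (n : Int) (ans : List Char) : List Char :=
  if n > 0 then
    if PySem.Int.mod n 2 = 0 then
      solveLoop (PySem.Int.floordiv n 2) (ans ++ ['B'])
    else
      solveLoop (n - 1) (ans ++ ['A'])
  else ans
termination_by n.toNat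
decreasing_by
  · have := PySem.Int.floordiv_eq_ediv_of_pos (a := n) (b := 2) (by omega)
    omega
  · omega

-- ans[::-1] is the reversal of the string (exact for a full slice with step -1)
def solve (n : Int) : String := String.mk (solveLoop n []).reverse

-- ===== PORT B =====
-- bin(m)[2:] for m > 0: the binary digits, most significant first ('' for m = 0)
def binDigits : Nat → List Char
  | 0 => []
  | m + 1 => binDigits ((m + 1) / 2) ++ [if (m + 1) % 2 = 1 then '1' else '0']

def solve_alt (n : Int) : String :=
  if n ≤ 0 then ""
  else
    match binDigits n.toNat with
    | [] => ""   -- unreachable for n > 0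
    | _ :: rest =>
        String.mk (rest.foldl (fun ans b => (ans ++ ['B']) ++ (if b = '1' then ['A'] else [])) ['A'])

-- ===== PRECONDITION & SPEC =====
def Spec_solve (n : Int) (out : String) : Prop := out = solve_alt n
instance (n : Int) (out : String) : Decidable (Spec_solve n out) := by unfold Spec_solve; infer_instance

-- ===== CLAIM (what is proved, stated in full; the proofs are below) =====
def Claim_equal_solve : Prop := ∀ (n : Int), Dom_solve n → Spec_solve n (solve n)

-- ===== LEMMAS AND PROOFS =====

-- A's loop only appends to ans
theorem solveLoop_append (n : Int) (ans : List Char) :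
    solveLoop n ans = ans ++ solveLoop n [] := by
  by_cases hpos : n > 0
  · by_cases heven : PySem.Int.mod n 2 = 0
    · conv_lhs => rw [solveLoop]
      conv_rhs => rw [solveLoop]
      simp only [if_pos hpos, if_pos heven, List.nil_append]
      rw [solveLoop_append (PySem.Int.floordiv n 2) (ans ++ ['B']),
          solveLoop_append (PySem.Int.floordiv n 2) ['B']]
      simp
    · conv_lhs => rw [solveLoop]
      conv_rhs => rw [solveLoop]
      simp only [if_pos hpos, if_neg heven, List.nil_append]
      rw [solveLoop_append (n - 1) (ans ++ ['A']), solveLoop_append (n - 1) ['A']]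
      simp
  · conv_lhs => rw [solveLoop]
    conv_rhs => rw [solveLoop]
    simp [hpos]
termination_by n.toNat
decreasing_by
  all_goals
    (have := PySem.Int.floordiv_eq_ediv_of_pos (a := n) (b := 2) (by omega); omega)

def buildB (l : List Char) : List Char :=
  match l with
  | [] => []
  | _ :: rest => rest.foldl (fun ans b => (ans ++ ['B']) ++ (if b = '1' then ['A'] else [])) ['A']

theorem binDigits_ne_nil (m : Nat) (hm : 0 < m) : binDigits m ≠ [] := by
  cases m with
  | zero => omega
  | succ k => simp [binDigits]

theorem buildB_concat (h : Char) (l : List Char) (b : Char) :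
    buildB (h :: l ++ [b]) =
      (buildB (h :: l) ++ ['B']) ++ (if b = '1' then ['A'] else []) := by
  simp [buildB, List.foldl_append]

-- core invariant: A's reversed loop output equals B's forward build over the binary digits
theorem loop_eq_build (m : Nat) (hm : 0 < m) :
    (solveLoop (m : Int) []).reverse = buildB (binDigits m) := by
  rcases Nat.lt_or_ge m 2 with h2 | h2
  · interval_cases m
    rw [solveLoop, if_pos (by norm_num), if_neg (by decide)]
    norm_num
    rw [solveLoop, if_neg (by norm_num)]
    simp [binDigits, buildB]
  · have hmod : PySem.Int.mod (m : Int) 2 = ((m % 2 : Nat) : Int) := by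
      exact_mod_cast PySem.Int.mod_natCast m 2
    have hdiv : PySem.Int.floordiv (m : Int) 2 = ((m / 2 : Nat) : Int) := by
      exact_mod_cast PySem.Int.floordiv_natCast m 2
    have hpos : (m : Int) > 0 := by exact_mod_cast hm
    have hhalf : 0 < m / 2 := by omega
    obtain ⟨h, tl, htl⟩ : ∃ h tl, binDigits (m / 2) = h :: tl := by
      rcases hne : binDigits (m / 2) with _ | ⟨h, tl⟩
      · exact absurd hne (binDigits_ne_nil _ hhalf)
      · exact ⟨h, tl, rfl⟩
    rcases Nat.even_or_odd m with he | ho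
    · -- even case
      have hm2 : m % 2 = 0 := Nat.even_iff.mp he
      rw [solveLoop]
      rw [if_pos hpos, if_pos (by rw [hmod, hm2]; simp)]
      rw [solveLoop_append, hdiv]
      have hbin : binDigits m = binDigits (m / 2) ++ ['0'] := by
        cases m with
        | zero => omega
        | succ k => simp [binDigits, hm2]
      rw [hbin, htl, buildB_concat]
      rw [← htl, ← loop_eq_build (m / 2) hhalf]
      simp
    · -- odd case: one 'A' step to m-1, then a 'B' step to (m-1)/2 = m/2
      have hm2 : m % 2 = 1 := Nat.odd_iff.mp ho
      rw [solveLoop]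
      rw [if_pos hpos, if_neg (by rw [hmod, hm2]; decide)]
      rw [solveLoop_append]
      have hm1 : (m : Int) - 1 = ((m - 1 : Nat) : Int) := by omega
      have hm1pos : ((m - 1 : Nat) : Int) > 0 := by omega
      have hm1mod : PySem.Int.mod ((m - 1 : Nat) : Int) 2 = (((m - 1) % 2 : Nat) : Int) := by
        exact_mod_cast PySem.Int.mod_natCast (m - 1) 2
      have hm1even : (m - 1) % 2 = 0 := by omega
      rw [hm1, solveLoop]
      rw [if_pos hm1pos, if_pos (by rw [hm1mod, hm1even]; simp)]
      rw [solveLoop_append]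
      have hdiv1 : PySem.Int.floordiv ((m - 1 : Nat) : Int) 2 = (((m - 1) / 2 : Nat) : Int) := by
        exact_mod_cast PySem.Int.floordiv_natCast (m - 1) 2
      have heq : (m - 1) / 2 = m / 2 := by omega
      rw [hdiv1, heq]
      have hbin : binDigits m = binDigits (m / 2) ++ ['1'] := by
        cases m with
        | zero => omega
        | succ k => simp [binDigits, hm2]
      rw [hbin, htl, buildB_concat]
      rw [← htl, ← loop_eq_build (m / 2) hhalf]
      simp
termination_by m
decreasing_by all_goals omega

-- ===== VERDICT (by name: the statement is the Claim_ definition above) =====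
theorem solve_spec : Claim_equal_solve := by
  intro n _
  unfold Spec_solve solve solve_alt
  by_cases hle : n ≤ 0
  · rw [if_pos hle, solveLoop, if_neg (by omega)]
    rfl
  · have hpos : 0 < n := by omega
    rw [if_neg hle]
    have hn : n = ((n.toNat : Nat) : Int) := by omega
    have hpos' : 0 < n.toNat := by omega
    have := loop_eq_build n.toNat hpos'
    rw [hn]
    rcases hne : binDigits n.toNat with _ | ⟨h, tl⟩
    · exact absurd hne (binDigits_ne_nil _ hpos')
    · rw [this, hne]
      simp only [Int.toNat_natCast, hne, buildB]
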